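-- pv_equiv track=rewrite | github.com/adotdong29/CoordPy | vision_mvp/experiments/scripts/phase79_xllm_gold_pilot.py | first_token
-- ===== SOURCE A (Python) =====
-- def first_token(text: str) -> str:
--     text = text.strip().lower()
--     for ch in ('"', "'", "`", ".", ",", ":", ";", "!", "?", "*", "\n"):
--         text = text.replace(ch, " ")
--     text = text.strip()
--     if not text:
--         return ""
--     return text.split()[0]
-- ===== SOURCE B (Python) =====
-- def first_token(text: str) -> str:
--     puncts = {'"', "'", "`", ".", ",", ":", ";", "!", "?", "*"}
--     s = text.lower()
--     n = len(s)
--     i = 0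
--     while i < n and (s[i].isspace() or s[i] in puncts):
--         i += 1
--     j = i
--     while j < n and not (s[j].isspace() or s[j] in puncts):
--         j += 1
--     return s[i:j]
-- ===== Notes on version B (the rewrite author's own statement) =====
-- stated objective: alternative
-- what changed: Replaces the build-then-split pipeline (strip, 11 full replace passes, strip, split into a word list) by a single left-to-right index scan of the lowercased input that skips leading separator characters and slices out the first maximal run of non-separators, building no intermediate strings or word lists.
import Mathlib
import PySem

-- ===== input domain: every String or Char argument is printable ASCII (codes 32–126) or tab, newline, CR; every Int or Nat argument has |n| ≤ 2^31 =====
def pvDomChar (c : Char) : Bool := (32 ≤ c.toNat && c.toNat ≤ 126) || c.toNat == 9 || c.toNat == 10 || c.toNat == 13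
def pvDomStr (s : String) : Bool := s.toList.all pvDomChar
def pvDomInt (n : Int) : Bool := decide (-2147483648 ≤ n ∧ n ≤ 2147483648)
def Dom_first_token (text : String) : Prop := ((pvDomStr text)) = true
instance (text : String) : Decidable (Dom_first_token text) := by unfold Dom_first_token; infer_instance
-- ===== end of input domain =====

-- B replaces A's build-then-split pipeline (strip, 11 replace passes, strip, split) by one
-- left-to-right scan of the lowercased input: skip leading separators, slice out the first token.

-- ===== PORT A =====
def first_token (text : String) : String :=
  let t0 := PySem.Str.lower (PySem.Str.strip text)
  let t1 := ["\"", "'", "`", ".", ",", ":", ";", "!", "?", "*", "\n"].foldl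
      (fun s ch => PySem.Str.replace s ch " ") t0
  let t2 := PySem.Str.strip t1
  if t2 = "" then ""
  else
    match PySem.List.pyGet? (PySem.Str.split₀ t2) 0 with
    | some w => w
    | none => ""   -- unreachable: the guard ensures t2 is nonempty, so split() is nonempty

-- ===== PORT B =====
-- separator: whitespace or one of the stripped punctuation characters
def pvSep (c : Char) : Bool :=
  PySem.Chars.isspace c || ['\"', '\'', '`', '.', ',', ':', ';', '!', '?', '*'].contains c

-- first while loop of Source B: advance past leading separators
def pvSkip : List Char → List Char
  | [] => []
  | c :: t => if pvSep c then pvSkip t else c :: t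

-- second while loop of Source B: collect characters up to the next separator
def pvTake : List Char → List Char
  | [] => []
  | c :: t => if pvSep c then [] else c :: pvTake t

def first_token_alt (text : String) : String :=
  String.ofList (pvTake (pvSkip ((PySem.Str.lower text).toList)))

-- ===== PRECONDITION & SPEC =====
def Spec_first_token (text : String) (out : String) : Prop := out = first_token_alt text
instance (text : String) (out : String) : Decidable (Spec_first_token text out) := by unfold Spec_first_token; infer_instance

-- ===== CLAIM (what is proved, stated in full; the proofs are below) =====
def Claim_equal_first_token : Prop := ∀ (text : String), Dom_first_token text → Spec_first_token text (first_token text)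

-- ===== LEMMAS AND PROOFS =====

-- the combined substitution A's replace-loop performs on each character
def pvSub (c : Char) : Char :=
  if ['\"', '\'', '`', '.', ',', ':', ';', '!', '?', '*', '\n'].contains c then ' ' else c

lemma pvIsspaceFalse (d : Char) (h1 : 33 ≤ d.toNat) (h2 : d.toNat ≤ 126) :
    PySem.Chars.isspace d = false := by
  simp only [PySem.Chars.isspace, Bool.or_eq_false_iff, Bool.and_eq_false_iff,
    decide_eq_false_iff_not]
  omega

lemma pvLowerCharIsspace (c : Char) :
    PySem.Chars.isspace (PySem.Chars.lowerChar c) = PySem.Chars.isspace c := by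
  unfold PySem.Chars.lowerChar
  split
  · rename_i h
    simp only [PySem.Chars.isupper, Bool.and_eq_true, decide_eq_true_eq, Char.le_def] at h
    have hA : 65 ≤ c.toNat := h.1
    have hZ : c.toNat ≤ 90 := h.2
    have hv : (c.toNat + 32).isValidChar := Or.inl (by omega)
    have ht : (Char.ofNat (c.toNat + 32)).toNat = c.toNat + 32 := by
      rw [Char.toNat_ofNat, if_pos hv]
    rw [pvIsspaceFalse _ (by omega) (by omega), pvIsspaceFalse c (by omega) (by omega)]
  · rfl

lemma pvReplaceGo (c : Char) : ∀ (fuel : Nat) (l acc : List Char), l.length ≤ fuel →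
    PySem.Chars.replace.go [c] [' '] fuel l acc
      = acc.reverse ++ l.map (fun x => if x = c then ' ' else x) := by
  intro fuel
  induction fuel with
  | zero =>
    intro l acc h
    have : l = [] := by cases l with | nil => rfl | cons a t => simp at h
    subst this
    have : PySem.Chars.replace.go [c] [' '] 0 [] acc = acc.reverse ++ [] := rfl
    simp [this]
  | succ n ih =>
    intro l acc h
    cases l with
    | nil =>
      have : PySem.Chars.replace.go [c] [' '] (n+1) [] acc = acc.reverse := rfl
      simp [this]
    | cons d t =>
      have hgo : PySem.Chars.replace.go [c] [' '] (n+1) (d :: t) acc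
          = if List.isPrefixOf [c] (d :: t) then
              PySem.Chars.replace.go [c] [' '] n (List.drop 1 (d :: t)) ([' '].reverse ++ acc)
            else PySem.Chars.replace.go [c] [' '] n t (d :: acc) := rfl
      rw [hgo]
      have hpre : List.isPrefixOf [c] (d :: t) = (c == d) := by
        simp [List.isPrefixOf]
      rw [hpre]
      by_cases hc : c = d
      · subst hc
        simp only [BEq.rfl, if_pos]
        rw [ih _ _ (by simpa using Nat.le_of_succ_le_succ (by simpa using h))]
        simp
      · rw [if_neg (by simpa using hc)]
        rw [ih _ _ (by simpa using Nat.le_of_succ_le_succ (by simpa using h))]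
        simp [Ne.symm hc]

lemma pvReplaceSingle (c : Char) (l : List Char) :
    PySem.Chars.replace l [c] [' '] = l.map (fun x => if x = c then ' ' else x) := by
  unfold PySem.Chars.replace
  rw [if_neg (by simp)]
  simpa using pvReplaceGo c l.length l [] le_rfl

lemma pvChainToList (t0 : String) :
    (["\"", "'", "`", ".", ",", ":", ";", "!", "?", "*", "\n"].foldl
        (fun s ch => PySem.Str.replace s ch " ") t0).toList
      = t0.toList.map pvSub := by
  simp only [List.foldl_cons, List.foldl_nil, PySem.Str.toList_replace]
  have e1 : ("\"" : String).toList = ['\"'] := rfl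
  have e2 : ("'" : String).toList = ['\''] := rfl
  have e3 : ("`" : String).toList = ['`'] := rfl
  have e4 : ("." : String).toList = ['.'] := rfl
  have e5 : ("," : String).toList = [','] := rfl
  have e6 : (":" : String).toList = [':'] := rfl
  have e7 : (";" : String).toList = [';'] := rfl
  have e8 : ("!" : String).toList = ['!'] := rfl
  have e9 : ("?" : String).toList = ['?'] := rfl
  have e10 : ("*" : String).toList = ['*'] := rfl
  have e11 : ("\n" : String).toList = ['\n'] := rfl
  have e12 : (" " : String).toList = [' '] := rfl
  simp only [e1, e2, e3, e4, e5, e6, e7, e8, e9, e10, e11, e12,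
    pvReplaceSingle, List.map_map]
  apply List.map_congr_left
  intro c _
  by_cases h : ['\"', '\'', '`', '.', ',', ':', ';', '!', '?', '*', '\n'].contains c
  · simp only [List.contains_eq_mem, List.mem_cons, decide_eq_true_eq] at h
    simp only [List.not_mem_nil, or_false] at h
    rcases h with h | h | h | h | h | h | h | h | h | h | h <;> subst h <;> rfl
  · simp only [List.contains_eq_mem, List.mem_cons, decide_eq_true_eq, not_or] at h
    obtain ⟨h1, h2, h3, h4, h5, h6, h7, h8, h9, h10, h11, -⟩ := h
    simp [pvSub, Function.comp, h1, h2, h3, h4, h5, h6, h7, h8, h9, h10, h11,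
      List.contains_eq_mem]

lemma pvGoAcc : ∀ (l cur : List Char) (acc : List (List Char)),
    PySem.Chars.split₀.go l cur acc = acc.reverse ++ PySem.Chars.split₀.go l cur [] := by
  intro l
  induction l with
  | nil =>
    intro cur acc
    simp only [PySem.Chars.split₀.go]
    split_ifs <;> simp
  | cons c rest ih =>
    intro cur acc
    simp only [PySem.Chars.split₀.go]
    split_ifs with h1 h2
    · exact ih [] acc
    · rw [ih [] (cur.reverse :: acc), ih [] [cur.reverse]]
      simp
    · exact ih (c :: cur) acc

lemma pvGoNe : ∀ (l cur : List Char), cur ≠ [] →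
    PySem.Chars.split₀.go l cur []
      = (cur.reverse ++ l.takeWhile (fun c => !PySem.Chars.isspace c))
        :: PySem.Chars.split₀.go (l.dropWhile (fun c => !PySem.Chars.isspace c)) [] [] := by
  intro l
  induction l with
  | nil =>
    intro cur hcur
    simp [PySem.Chars.split₀.go, hcur]
  | cons c rest ih =>
    intro cur hcur
    have hce : cur.isEmpty = false := by simp [hcur]
    by_cases hsp : PySem.Chars.isspace c
    · simp only [PySem.Chars.split₀.go, hsp, if_pos, hce, Bool.false_eq_true, if_false]
      rw [pvGoAcc rest [] [cur.reverse]]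
      simp only [List.takeWhile_cons, List.dropWhile_cons, hsp, Bool.not_true,
        Bool.false_eq_true, if_false, List.reverse_cons, List.reverse_nil,
        List.nil_append, List.append_nil, List.cons_append]
      rw [show PySem.Chars.split₀.go (c :: rest) [] [] = PySem.Chars.split₀.go rest [] [] by
        simp [PySem.Chars.split₀.go, hsp]]
    · simp only [PySem.Chars.split₀.go, hsp]
      simp only [Bool.false_eq_true, if_false]
      rw [ih (c :: cur) (by simp)]
      simp [hsp]

lemma pvSplitHead : ∀ (l : List Char),
    (PySem.Chars.split₀ l).headD []
      = (l.dropWhile PySem.Chars.isspace).takeWhile (fun c => !PySem.Chars.isspace c) := by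
  intro l
  induction l with
  | nil => rfl
  | cons c rest ih =>
    by_cases hsp : PySem.Chars.isspace c
    · show (PySem.Chars.split₀.go (c :: rest) [] []).headD [] = _
      simp only [PySem.Chars.split₀.go, hsp, if_pos, List.isEmpty_nil]
      rw [List.dropWhile_cons_of_pos hsp]
      exact ih
    · show (PySem.Chars.split₀.go (c :: rest) [] []).headD [] = _
      simp only [PySem.Chars.split₀.go, hsp]
      simp only [Bool.false_eq_true, if_false, List.isEmpty_nil, if_true]
      rw [pvGoNe rest [c] (by simp)]
      simp [hsp]

lemma pvDropAll {s : Char → Bool} : ∀ (u v : List Char), (∀ c ∈ u, s c = true) →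
    (u ++ v).dropWhile s = v.dropWhile s := by
  intro u v h
  induction u with
  | nil => rfl
  | cons a u ih =>
    rw [List.cons_append, List.dropWhile_cons_of_pos (h a (by simp))]
    exact ih (fun c hc => h c (by simp [hc]))

lemma pvTakeAll {q : Char → Bool} : ∀ (u v : List Char), (∀ c ∈ v, q c = false) →
    (u ++ v).takeWhile q = u.takeWhile q := by
  intro u v h
  induction u with
  | nil =>
    cases v with
    | nil => rfl
    | cons a v =>
      simp only [List.nil_append, List.takeWhile_nil]
      rw [List.takeWhile_cons_of_neg (by simp [h a (by simp)])]
  | cons a u ih =>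
    rw [List.cons_append]
    by_cases hq : q a
    · rw [List.takeWhile_cons_of_pos hq, List.takeWhile_cons_of_pos hq, ih]
    · rw [List.takeWhile_cons_of_neg (by simpa using hq),
        List.takeWhile_cons_of_neg (by simpa using hq)]

lemma pvStripElim (sep : Char → Bool)
    (hs : ∀ c, PySem.Chars.isspace c = true → sep c = true) (m : List Char) :
    ((PySem.Chars.strip m).dropWhile sep).takeWhile (fun c => !sep c)
      = (m.dropWhile sep).takeWhile (fun c => !sep c) := by
  have hk : PySem.Chars.strip m
      = List.rdropWhile PySem.Chars.isspace (m.dropWhile PySem.Chars.isspace) := rfl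
  have h1 : m.dropWhile sep = (m.dropWhile PySem.Chars.isspace).dropWhile sep := by
    conv_lhs => rw [← List.takeWhile_append_dropWhile (p := PySem.Chars.isspace) (l := m)]
    exact pvDropAll _ _ (fun c hc => hs c (List.mem_takeWhile_imp hc))
  rw [h1, hk]
  set k := m.dropWhile PySem.Chars.isspace with hkdef
  have h2 : k = List.rdropWhile PySem.Chars.isspace k ++ List.rtakeWhile PySem.Chars.isspace k :=
    (List.rdropWhile_append_rtakeWhile).symm
  have hall : ∀ c ∈ List.rtakeWhile PySem.Chars.isspace k, sep c = true :=
    fun c hc => hs c (List.mem_rtakeWhile_imp hc)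
  conv_rhs => rw [h2]
  rw [List.dropWhile_append]
  split_ifs with h
  · have h' : (List.rdropWhile PySem.Chars.isspace k).dropWhile sep = [] := by
      simpa using h
    rw [h', List.dropWhile_eq_nil_iff.mpr hall]
  · rw [pvTakeAll _ _ (fun c hc => by simp [hall c hc])]

lemma pvLowerStrip (m : List Char) :
    PySem.Chars.lower (PySem.Chars.strip m) = PySem.Chars.strip (PySem.Chars.lower m) := by
  have hcomp : (PySem.Chars.isspace ∘ PySem.Chars.lowerChar) = PySem.Chars.isspace :=
    funext pvLowerCharIsspace
  simp only [PySem.Chars.lower, PySem.Chars.strip, PySem.Chars.lstrip, PySem.Chars.rstrip]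
  rw [List.dropWhile_map, hcomp, ← List.map_reverse, List.dropWhile_map, hcomp,
    ← List.map_reverse]

lemma pvContains10To11 (c : Char)
    (h : (['\"', '\'', '`', '.', ',', ':', ';', '!', '?', '*'] : List Char).contains c = true) :
    (['\"', '\'', '`', '.', ',', ':', ';', '!', '?', '*', '\n'] : List Char).contains c = true := by
  simp only [List.contains_eq_mem, List.mem_cons, decide_eq_true_eq] at h ⊢
  tauto

lemma pvSepSub (c : Char) (h : pvSep c = true) : PySem.Chars.isspace (pvSub c) = true := by
  unfold pvSub
  by_cases h11 : (['\"', '\'', '`', '.', ',', ':', ';', '!', '?', '*', '\n'] : List Char).contains c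
  · rw [if_pos h11]; decide
  · rw [if_neg h11]
    unfold pvSep at h
    rcases Bool.or_eq_true_iff.mp h with hsp | h10
    · exact hsp
    · exact absurd (pvContains10To11 c h10) h11

lemma pvNotSepSub (c : Char) (h : pvSep c = false) :
    pvSub c = c ∧ PySem.Chars.isspace c = false := by
  unfold pvSep at h
  simp only [Bool.or_eq_false_iff] at h
  obtain ⟨hsp, h10⟩ := h
  refine ⟨?_, hsp⟩
  unfold pvSub
  rw [if_neg]
  intro h11
  simp only [List.contains_eq_mem, List.mem_cons, List.not_mem_nil, or_false,
    decide_eq_true_eq, decide_eq_false_iff_not] at h10 h11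
  have hne : c = '\n' := by tauto
  rw [hne] at hsp
  exact absurd hsp (by decide)

lemma pvSkipEq (l : List Char) : pvSkip l = l.dropWhile pvSep := by
  induction l with
  | nil => rfl
  | cons c t ih =>
    simp only [pvSkip]
    by_cases h : pvSep c
    · rw [if_pos h, List.dropWhile_cons_of_pos h, ih]
    · rw [if_neg h, List.dropWhile_cons_of_neg (by simpa using h)]

lemma pvTakeEq (l : List Char) : pvTake l = l.takeWhile (fun c => !pvSep c) := by
  induction l with
  | nil => rfl
  | cons c t ih =>
    simp only [pvTake, List.takeWhile_cons]
    by_cases h : pvSep c <;> simp [h, ih]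

lemma pvM2 (m : List Char) :
    (m.map pvSub).takeWhile (fun c => !PySem.Chars.isspace c)
      = m.takeWhile (fun c => !pvSep c) := by
  induction m with
  | nil => rfl
  | cons c m ih =>
    simp only [List.map_cons, List.takeWhile_cons]
    by_cases h : pvSep c
    · simp [pvSepSub c h, h]
    · obtain ⟨he, hsp⟩ := pvNotSepSub c (by simpa using h)
      simp [he, hsp, h, ih]

lemma pvM (m : List Char) :
    ((m.map pvSub).dropWhile PySem.Chars.isspace).takeWhile (fun c => !PySem.Chars.isspace c)
      = (m.dropWhile pvSep).takeWhile (fun c => !pvSep c) := by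
  induction m with
  | nil => rfl
  | cons c m ih =>
    simp only [List.map_cons, List.dropWhile_cons]
    by_cases h : pvSep c
    · simp only [pvSepSub c h, h, if_pos]
      exact ih
    · obtain ⟨he, hsp⟩ := pvNotSepSub c (by simpa using h)
      have h' : pvSep c = false := by simpa using h
      simp only [he, hsp, h', Bool.false_eq_true, if_false]
      rw [List.takeWhile_cons_of_pos (by simp [hsp]),
        List.takeWhile_cons_of_pos (by simp [h']), pvM2 m]

-- ===== VERDICT (by name: the statement is the Claim_ definition above) =====
theorem first_token_spec : Claim_equal_first_token := by
  unfold Claim_equal_first_token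
  intro text _
  unfold Spec_first_token first_token first_token_alt
  rw [← String.toList_inj]
  have hB : (String.ofList (pvTake (pvSkip ((PySem.Str.lower text).toList)))).toList
      = pvTake (pvSkip (PySem.Chars.lower text.toList)) := by
    simp [PySem.Str.toList_lower]
  have ht2 : (PySem.Str.strip (["\"", "'", "`", ".", ",", ":", ";", "!", "?", "*", "\n"].foldl
      (fun s ch => PySem.Str.replace s ch " ") (PySem.Str.lower (PySem.Str.strip text)))).toList
      = PySem.Chars.strip
          ((PySem.Chars.lower (PySem.Chars.strip text.toList)).map pvSub) := by
    rw [PySem.Str.toList_strip, pvChainToList]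
    simp [PySem.Str.toList_lower, PySem.Str.toList_strip]
  -- central equality: A's pipeline and B's scan extract the same first token
  have E : ((PySem.Chars.strip ((PySem.Chars.lower (PySem.Chars.strip text.toList)).map
        pvSub)).dropWhile PySem.Chars.isspace).takeWhile (fun c => !PySem.Chars.isspace c)
      = pvTake (pvSkip (PySem.Chars.lower text.toList)) := by
    rw [pvStripElim PySem.Chars.isspace (fun _ h => h), pvLowerStrip, pvM,
      pvStripElim pvSep (fun c h => by simp [pvSep, h]),
      pvSkipEq, pvTakeEq]
  rw [hB, ← E]
  dsimp only
  split_ifs with hemp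
  · -- stripped replaced text is empty: both sides are the empty token
    rw [← String.toList_inj] at hemp
    rw [ht2] at hemp
    simp [hemp]
  · -- nonempty: A returns the head of split(), which is the first token
    have hsp : PySem.Str.split₀ (PySem.Str.strip (["\"", "'", "`", ".", ",", ":", ";", "!",
        "?", "*", "\n"].foldl (fun s ch => PySem.Str.replace s ch " ")
        (PySem.Str.lower (PySem.Str.strip text))))
        = List.map String.ofList (PySem.Chars.split₀ (PySem.Chars.strip
            ((PySem.Chars.lower (PySem.Chars.strip text.toList)).map pvSub))) := by
      rw [PySem.Str.split₀]
      rw [ht2]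
    rw [hsp]
    have hhead := pvSplitHead (PySem.Chars.strip
      ((PySem.Chars.lower (PySem.Chars.strip text.toList)).map pvSub))
    cases hcs : PySem.Chars.split₀ (PySem.Chars.strip
        ((PySem.Chars.lower (PySem.Chars.strip text.toList)).map pvSub)) with
    | nil =>
      rw [hcs] at hhead
      simp only [List.headD_nil] at hhead
      simp [PySem.List.pyGet?, PySem.List.pyIdx?, ← hhead]
    | cons w ws =>
      rw [hcs] at hhead
      simp only [List.headD_cons] at hhead
      simp only [List.map_cons]
      rw [show PySem.List.pyGet? (String.ofList w :: List.map String.ofList ws) 0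
          = some (String.ofList w) by simp [PySem.List.pyGet?, PySem.List.pyIdx?]]
      simp [← hhead]
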